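-- pv_equiv track=rewrite | github.com/cjmurphy27/barn-management | app/services/receipt_processor.py | _suggest_unit_type
-- ===== SOURCE A (Python) =====
-- def _suggest_unit_type(category: str, description: str) -> str:
--     """Suggest appropriate unit type based on category and description"""
--
--     desc_lower = description.lower()
--
--     if category == "feed_nutrition":
--         if any(word in desc_lower for word in ["bale", "hay"]):
--             return "bales"
--         elif any(word in desc_lower for word in ["bag", "feed", "grain"]):
--             return "bags"
--         else:
--             return "pounds"
--
--     elif category == "bedding":
--         if "bale" in desc_lower:
--             return "bales"
--         else:
--             return "bags"
--
--     elif category == "health_medical":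
--         if any(word in desc_lower for word in ["bottle", "liquid"]):
--             return "bottles"
--         elif any(word in desc_lower for word in ["tube", "paste"]):
--             return "each"
--         else:
--             return "each"
--
--     else:
--         return "each"
-- ===== SOURCE B (Python) =====
-- # Flat rule list: collect every matching (category, keyword) hit, then take the first; defaults separate.
-- _RULES = [
--     ("feed_nutrition", "bale", "bales"),
--     ("feed_nutrition", "hay", "bales"),
--     ("feed_nutrition", "bag", "bags"),
--     ("feed_nutrition", "feed", "bags"),
--     ("feed_nutrition", "grain", "bags"),
--     ("bedding", "bale", "bales"),
--     ("health_medical", "bottle", "bottles"),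
--     ("health_medical", "liquid", "bottles"),
-- ]
-- _DEFAULTS = {"feed_nutrition": "pounds", "bedding": "bags", "health_medical": "each"}
--
--
-- def _suggest_unit_type(category: str, description: str) -> str:
--     d = description.lower()
--     hits = [unit for cat, kw, unit in _RULES if cat == category and kw in d]
--     return hits[0] if hits else _DEFAULTS.get(category, "each")
-- ===== Notes on version B (the rewrite author's own statement) =====
-- stated objective: idiomatic
-- what changed: Replaced the nested short-circuiting if/elif branches by a flat (category, keyword, unit) rule list filtered exhaustively in one comprehension, taking the first hit and falling back to a defaults dict; the redundant tube/paste branch disappears.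
import Mathlib
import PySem

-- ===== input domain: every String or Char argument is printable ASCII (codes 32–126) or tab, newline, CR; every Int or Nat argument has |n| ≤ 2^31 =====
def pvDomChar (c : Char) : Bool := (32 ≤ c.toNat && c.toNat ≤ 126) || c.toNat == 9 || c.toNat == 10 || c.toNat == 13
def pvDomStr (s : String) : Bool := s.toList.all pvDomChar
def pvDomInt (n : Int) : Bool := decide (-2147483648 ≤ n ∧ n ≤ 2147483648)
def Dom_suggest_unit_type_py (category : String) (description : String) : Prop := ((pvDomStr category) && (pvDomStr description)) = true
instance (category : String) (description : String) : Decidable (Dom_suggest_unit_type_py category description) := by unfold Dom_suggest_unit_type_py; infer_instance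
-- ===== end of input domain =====

-- B replaces A's nested short-circuiting if/elif branches by an exhaustive filter over a flat (category, keyword, unit) rule list, taking the first hit, with a separate defaults dict (idiomatic, same cost).


-- ===== PORT A =====
def suggest_unit_type_py (category : String) (description : String) : String :=
  let desc_lower := PySem.Str.lower description
  if category == "feed_nutrition" then
    if ["bale", "hay"].any (fun word => PySem.Str.isIn word desc_lower) then "bales"
    else if ["bag", "feed", "grain"].any (fun word => PySem.Str.isIn word desc_lower) then "bags"
    else "pounds"
  else if category == "bedding" then
    if PySem.Str.isIn "bale" desc_lower then "bales" else "bags"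
  else if category == "health_medical" then
    if ["bottle", "liquid"].any (fun word => PySem.Str.isIn word desc_lower) then "bottles"
    else if ["tube", "paste"].any (fun word => PySem.Str.isIn word desc_lower) then "each"
    else "each"
  else "each"

-- ===== PORT B =====
-- flat module-level rule list: (category, keyword, unit)
def pvRules : List (String × String × String) :=
  [("feed_nutrition", "bale", "bales"),
   ("feed_nutrition", "hay", "bales"),
   ("feed_nutrition", "bag", "bags"),
   ("feed_nutrition", "feed", "bags"),
   ("feed_nutrition", "grain", "bags"),
   ("bedding", "bale", "bales"),
   ("health_medical", "bottle", "bottles"),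
   ("health_medical", "liquid", "bottles")]

def pvDefaults : PySem.Dict String String :=
  PySem.Dict.ofList [("feed_nutrition", "pounds"), ("bedding", "bags"), ("health_medical", "each")]

def suggest_unit_type_py_alt (category : String) (description : String) : String :=
  let d := PySem.Str.lower description
  -- hits = [unit for cat, kw, unit in _RULES if cat == category and kw in d]
  let hits := (pvRules.filter (fun r => r.1 == category && PySem.Str.isIn r.2.1 d)).map (fun r => r.2.2)
  -- hits[0] if hits else _DEFAULTS.get(category, "each")
  match hits with
  | [] => PySem.Dict.getD pvDefaults category "each"
  | u :: _ => u

-- ===== PRECONDITION & SPEC =====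
def Spec_suggest_unit_type_py (category : String) (description : String) (out : String) : Prop := out = suggest_unit_type_py_alt category description
instance (category : String) (description : String) (out : String) : Decidable (Spec_suggest_unit_type_py category description out) := by unfold Spec_suggest_unit_type_py; infer_instance

-- ===== CLAIM =====
def Claim_equal_suggest_unit_type_py : Prop := ∀ (category : String) (description : String), Dom_suggest_unit_type_py category description → Spec_suggest_unit_type_py category description (suggest_unit_type_py category description)

-- ===== LEMMAS AND PROOFS =====

-- ===== VERDICT =====
theorem suggest_unit_type_py_spec : Claim_equal_suggest_unit_type_py := by
  intro category description _
  unfold Spec_suggest_unit_type_py suggest_unit_type_py suggest_unit_type_py_alt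
  by_cases h1 : category = "feed_nutrition"
  · subst h1
    by_cases a1 : PySem.Chars.isIn ['b', 'a', 'l', 'e'] (PySem.Chars.lower description.toList) <;>
    by_cases a2 : PySem.Chars.isIn ['h', 'a', 'y'] (PySem.Chars.lower description.toList) <;>
    by_cases a3 : PySem.Chars.isIn ['b', 'a', 'g'] (PySem.Chars.lower description.toList) <;>
    by_cases a4 : PySem.Chars.isIn ['f', 'e', 'e', 'd'] (PySem.Chars.lower description.toList) <;>
    by_cases a5 : PySem.Chars.isIn ['g', 'r', 'a', 'i', 'n'] (PySem.Chars.lower description.toList) <;>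
      (simp [pvRules, pvDefaults, List.filter, a1, a2, a3, a4, a5, PySem.Dict.getD, PySem.Dict.get?]; try decide)
  · have h1b : ("feed_nutrition" == category) = false := beq_eq_false_iff_ne.mpr (Ne.symm h1)
    by_cases h2 : category = "bedding"
    · subst h2
      by_cases a1 : PySem.Chars.isIn ['b', 'a', 'l', 'e'] (PySem.Chars.lower description.toList) <;>
        (simp [pvRules, pvDefaults, List.filter, a1, PySem.Dict.getD, PySem.Dict.get?]; try decide)
    · have h2b : ("bedding" == category) = false := beq_eq_false_iff_ne.mpr (Ne.symm h2)
      by_cases h3 : category = "health_medical"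
      · subst h3
        by_cases a1 : PySem.Chars.isIn ['b', 'o', 't', 't', 'l', 'e'] (PySem.Chars.lower description.toList) <;>
        by_cases a2 : PySem.Chars.isIn ['l', 'i', 'q', 'u', 'i', 'd'] (PySem.Chars.lower description.toList) <;>
          (simp [pvRules, pvDefaults, List.filter, a1, a2, PySem.Dict.getD, PySem.Dict.get?]; try decide)
      · have h3b : ("health_medical" == category) = false := beq_eq_false_iff_ne.mpr (Ne.symm h3)
        have hitems : pvDefaults.items =
            [("feed_nutrition", "pounds"), ("bedding", "bags"), ("health_medical", "each")] := rfl
        simp [h1, h2, h3, h1b, h2b, h3b, pvRules, List.filter,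
          PySem.Dict.getD, PySem.Dict.get?, hitems, List.find?]
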